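-- pv_equiv track=rewrite | github.com/TherionAcribus/GeoApp | plugins/official/rozier/main.py | _process
-- ===== SOURCE A (Python) =====
-- from typing import Any, Dict, List, Tuple
--
-- def _process(text: str, key: str, encode: bool,
--              preserve_case: bool, keep_spaces: bool) -> str:
--     """
--     Applique le chiffrement ou déchiffrement de Rozier lettre par lettre.
--
--     Seules les lettres sont transformées. Les autres caractères sont
--     soit conservés (keep_spaces=True) soit supprimés.
--     """
--     n = len(key)
--     key_vals = [ord(c) - ord('A') for c in key]
--
--     result: List[str] = []
--     alpha_idx = 0
--
--     for ch in text:
--         if ch.isalpha():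
--             is_lower = ch.islower()
--             val = ord(ch.upper()) - ord('A')
--             i = alpha_idx % n
--             k0 = key_vals[i]
--             k1 = key_vals[(i + 1) % n]
--
--             if encode:
--                 new_val = (val + k1 - k0) % 26
--             else:
--                 new_val = (val - k1 + k0) % 26
--
--             new_ch = chr(new_val + ord('A'))
--             if preserve_case and is_lower:
--                 new_ch = new_ch.lower()
--             result.append(new_ch)
--             alpha_idx += 1
--         else:
--             if keep_spaces:
--                 result.append(ch)
--
--     return ''.join(result)
-- ===== SOURCE B (Python) =====
-- def _process(text: str, key: str, encode: bool,
--              preserve_case: bool, keep_spaces: bool) -> str: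
--     """Three-phase Rozier cipher: extract letters, transform via a
--     precomputed cyclic delta table, then reweave into the original text."""
--     letters = [ch for ch in text if ch.isalpha()]
--     n = len(key)
--     key_vals = [ord(c) - ord('A') for c in key]
--     deltas = [(key_vals[(i + 1) % n] - key_vals[i]) % 26 for i in range(n)]
--     sign = 1 if encode else -1
--
--     transformed = []
--     for i, ch in enumerate(letters):
--         val = ord(ch.upper()) - ord('A')
--         new_val = (val + sign * deltas[i % n]) % 26
--         c = chr(new_val + ord('A'))
--         if preserve_case and ch.islower():
--             c = c.lower()
--         transformed.append(c)
--
--     it = iter(transformed)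
--     out = []
--     for ch in text:
--         if ch.isalpha():
--             out.append(next(it))
--         elif keep_spaces:
--             out.append(ch)
--     return ''.join(out)
-- ===== Notes on version B (the rewrite author's own statement) =====
-- stated objective: alternative
-- what changed: Replaces A's single stateful loop (alpha counter, per-letter key lookups and per-letter branch on encode) with three phases: extract the letters, transform them by enumerate index against a precomputed cyclic delta table (one signed delta per key position), and reweave the transformed letters back through the original text with an iterator.
import Mathlib
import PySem

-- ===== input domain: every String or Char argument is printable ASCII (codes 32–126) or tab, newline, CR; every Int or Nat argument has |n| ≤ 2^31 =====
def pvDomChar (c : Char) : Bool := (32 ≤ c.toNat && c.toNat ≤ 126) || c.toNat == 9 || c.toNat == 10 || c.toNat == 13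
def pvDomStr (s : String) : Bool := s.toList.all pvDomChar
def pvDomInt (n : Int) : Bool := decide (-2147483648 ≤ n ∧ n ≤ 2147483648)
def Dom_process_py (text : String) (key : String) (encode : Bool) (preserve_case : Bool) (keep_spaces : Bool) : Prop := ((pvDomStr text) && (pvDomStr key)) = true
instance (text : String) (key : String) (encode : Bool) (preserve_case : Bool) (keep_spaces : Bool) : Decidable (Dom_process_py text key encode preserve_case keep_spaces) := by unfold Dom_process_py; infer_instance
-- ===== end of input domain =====

-- B re-decomposes A's single stateful loop into three phases (extract letters, transform by index
-- against a precomputed cyclic delta table, reweave into the original text); same cost, alternative structure.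


-- ===== PORT A =====
-- A's single loop over text with the running alpha counter; keyVals[i] lookups are in range
-- whenever Python does not raise (Pre_ guarantees n > 0 when a letter is reached), so getD is exact there.
def pvA_loop (keyVals : List Int) (n : Nat) (encode preserve_case keep_spaces : Bool) :
    List Char → Nat → List Char
  | [], _ => []
  | ch :: rest, alphaIdx =>
    if PySem.Chars.isalpha ch then
      let isLower := PySem.Chars.islower ch
      let val : Int := ((PySem.Chars.upperChar ch).toNat : Int) - 65
      let i := alphaIdx % n
      let k0 := keyVals.getD i 0
      let k1 := keyVals.getD ((i + 1) % n) 0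
      let newVal := if encode then PySem.Int.mod (val + k1 - k0) 26 else PySem.Int.mod (val - k1 + k0) 26
      let newCh := Char.ofNat (newVal.toNat + 65)
      let newCh' := if preserve_case && isLower then PySem.Chars.lowerChar newCh else newCh
      newCh' :: pvA_loop keyVals n encode preserve_case keep_spaces rest (alphaIdx + 1)
    else if keep_spaces then ch :: pvA_loop keyVals n encode preserve_case keep_spaces rest alphaIdx
    else pvA_loop keyVals n encode preserve_case keep_spaces rest alphaIdx

def process_py (text : String) (key : String) (encode : Bool) (preserve_case : Bool) (keep_spaces : Bool) : String :=
  let n := key.toList.length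
  let keyVals := key.toList.map (fun c => ((c.toNat : Int) - 65))
  String.mk (pvA_loop keyVals n encode preserve_case keep_spaces text.toList 0)

-- ===== PORT B =====
-- B's per-letter transform: index i into the precomputed delta table (deltas.getD is exact: i % n < n).
def pvB_f (deltas : List Int) (n : Nat) (sign : Int) (preserve_case : Bool) (p : Char × Nat) : Char :=
  let val : Int := ((PySem.Chars.upperChar p.1).toNat : Int) - 65
  let newVal := PySem.Int.mod (val + sign * deltas.getD (p.2 % n) 0) 26
  let c := Char.ofNat (newVal.toNat + 65)
  if preserve_case && PySem.Chars.islower p.1 then PySem.Chars.lowerChar c else c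

-- B's reweave loop: each alphabetic position takes the next transformed letter (next(it); the empty
-- case is unreachable since the transformed list has exactly one letter per alphabetic position).
def pvB_reweave (keep_spaces : Bool) : List Char → List Char → List Char
  | [], _ => []
  | c :: cs, ts =>
    if PySem.Chars.isalpha c then
      match ts with
      | t :: ts' => t :: pvB_reweave keep_spaces cs ts'
      | [] => []
    else if keep_spaces then c :: pvB_reweave keep_spaces cs ts
    else pvB_reweave keep_spaces cs ts

def process_py_alt (text : String) (key : String) (encode : Bool) (preserve_case : Bool) (keep_spaces : Bool) : String :=
  let letters := text.toList.filter PySem.Chars.isalpha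
  let n := key.toList.length
  let keyVals := key.toList.map (fun c => ((c.toNat : Int) - 65))
  let deltas := (List.range n).map (fun i => PySem.Int.mod (keyVals.getD ((i + 1) % n) 0 - keyVals.getD i 0) 26)
  let sign : Int := if encode then 1 else -1
  let transformed := letters.zipIdx.map (pvB_f deltas n sign preserve_case)
  String.mk (pvB_reweave keep_spaces text.toList transformed)

-- ===== PRECONDITION & SPEC =====
-- Pre_ excludes exactly the inputs on which A raises ZeroDivisionError (alpha_idx % 0): empty key
-- together with a text containing at least one letter.  B raises there too.
def Pre_process_py (text : String) (key : String) (encode : Bool) (preserve_case : Bool) (keep_spaces : Bool) : Prop :=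
  key.toList ≠ [] ∨ (text.toList.all (fun c => !PySem.Chars.isalpha c)) = true
instance (text : String) (key : String) (encode : Bool) (preserve_case : Bool) (keep_spaces : Bool) : Decidable (Pre_process_py text key encode preserve_case keep_spaces) := by unfold Pre_process_py; infer_instance

def pvWitness_process_py : String × String × Bool × Bool × Bool := ("Hello, World!", "KEY", true, true, true)

def Spec_process_py (text : String) (key : String) (encode : Bool) (preserve_case : Bool) (keep_spaces : Bool) (out : String) : Prop := out = process_py_alt text key encode preserve_case keep_spaces
instance (text : String) (key : String) (encode : Bool) (preserve_case : Bool) (keep_spaces : Bool) (out : String) : Decidable (Spec_process_py text key encode preserve_case keep_spaces out) := by unfold Spec_process_py; infer_instance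

-- ===== CLAIM (what is proved, stated in full; the proofs are below) =====
def Claim_equal_process_py : Prop := ∀ (text : String) (key : String) (encode : Bool) (preserve_case : Bool) (keep_spaces : Bool), Dom_process_py text key encode preserve_case keep_spaces → Pre_process_py text key encode preserve_case keep_spaces → Spec_process_py text key encode preserve_case keep_spaces (process_py text key encode preserve_case keep_spaces)

-- ===== LEMMAS AND PROOFS =====

-- The two per-letter computations agree: A's inline '(val ± (k1 - k0)) % 26' equals B's
-- 'val + sign * ((k1 - k0) % 26)' modulo 26.
theorem pvEnc (v k0 k1 : Int) :
    PySem.Int.mod (v + 1 * PySem.Int.mod (k1 - k0) 26) 26 = PySem.Int.mod (v + k1 - k0) 26 := by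
  rw [PySem.Int.mod_eq_emod_of_pos (b := 26) (by norm_num), PySem.Int.mod_eq_emod_of_pos (b := 26) (by norm_num),
      PySem.Int.mod_eq_emod_of_pos (b := 26) (by norm_num)]
  omega

theorem pvDec (v k0 k1 : Int) :
    PySem.Int.mod (v + -1 * PySem.Int.mod (k1 - k0) 26) 26 = PySem.Int.mod (v - k1 + k0) 26 := by
  rw [PySem.Int.mod_eq_emod_of_pos (b := 26) (by norm_num), PySem.Int.mod_eq_emod_of_pos (b := 26) (by norm_num),
      PySem.Int.mod_eq_emod_of_pos (b := 26) (by norm_num)]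
  omega

-- When the key is nonempty, A's loop from counter a equals B's reweave of the letters
-- transformed with enumerate indices starting at a.
theorem pvMain (keyVals : List Int) (n : Nat) (hn : 0 < n)
    (encode preserve_case keep_spaces : Bool) (cs : List Char) (a : Nat) :
    pvA_loop keyVals n encode preserve_case keep_spaces cs a =
      pvB_reweave keep_spaces cs
        (((cs.filter PySem.Chars.isalpha).zipIdx a).map
          (pvB_f ((List.range n).map (fun i => PySem.Int.mod (keyVals.getD ((i + 1) % n) 0 - keyVals.getD i 0) 26))
            n (if encode then (1 : Int) else -1) preserve_case)) := by
  induction cs generalizing a with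
  | nil => simp [pvA_loop, pvB_reweave]
  | cons c rest ih =>
    by_cases hc : PySem.Chars.isalpha c
    · rw [List.filter_cons_of_pos hc]
      simp only [pvA_loop, pvB_reweave, hc, if_pos, List.zipIdx_cons, List.map_cons]
      rw [ih (a + 1)]
      congr 1
      have hlt : a % n < n := Nat.mod_lt _ hn
      simp only [pvB_f]
      rw [PySem.List.getD_map_range _ n (a % n) 0 hlt]
      cases encode with
      | true => rw [show (if true = true then (1 : Int) else -1) = 1 from rfl, pvEnc]; rfl
      | false => rw [show (if false = true then (1 : Int) else -1) = -1 from rfl, pvDec]; rfl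
    · rw [List.filter_cons_of_neg hc]
      cases keep_spaces <;> simp [pvA_loop, pvB_reweave, hc, ih a]

-- With no letters in the text, both sides ignore the key entirely.
theorem pvNoAlpha (keyVals : List Int) (n : Nat) (encode preserve_case keep_spaces : Bool)
    (cs : List Char) (h : ∀ c ∈ cs, PySem.Chars.isalpha c = false) (a : Nat) (ts : List Char) :
    pvA_loop keyVals n encode preserve_case keep_spaces cs a = pvB_reweave keep_spaces cs ts := by
  induction cs generalizing a with
  | nil => simp [pvA_loop, pvB_reweave]
  | cons c rest ih =>
    have hc := h c (by simp)
    have hrest : ∀ c ∈ rest, PySem.Chars.isalpha c = false := fun x hx => h x (by simp [hx])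
    cases keep_spaces <;> simp [pvA_loop, pvB_reweave, hc, ih hrest a]

theorem pvNoAlpha_filter (cs : List Char) (h : ∀ c ∈ cs, PySem.Chars.isalpha c = false) :
    cs.filter PySem.Chars.isalpha = [] := by
  simp [List.filter_eq_nil_iff]; exact fun c hc => by simp [h c hc]

-- ===== VERDICT (by name: the statement is the Claim_ definition above) =====
theorem process_py_spec : Claim_equal_process_py := by
  intro text key encode preserve_case keep_spaces _hdom hpre
  show process_py text key encode preserve_case keep_spaces = _
  simp only [process_py, process_py_alt]
  rcases hpre with hk | hna
  · have hn : 0 < key.toList.length := by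
      cases h : key.toList with
      | nil => exact absurd h hk
      | cons c cs => simp
    rw [pvMain _ _ hn]
  · have h : ∀ c ∈ text.toList, PySem.Chars.isalpha c = false := by
      intro c hc
      have := List.all_eq_true.mp hna c hc
      simpa using this
    rw [pvNoAlpha_filter _ h]
    simp only [List.zipIdx_nil, List.map_nil]
    exact congrArg String.mk (pvNoAlpha _ _ _ _ _ _ h 0 [])
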